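-- pv_equiv track=rewrite | github.com/Flame77Ofc/Python | EXERCICIOS/Exercicios/Edabit/ex053.py | mais
-- ===== SOURCE A (Python) =====
-- def mais(lista):
--   pares = impares = 0
--   for elemento in lista:
--     if elemento % 2 == 0:
--       pares += 1
--     else:
--       impares += 1
--   return True if impares > pares else False
-- ===== SOURCE B (Python) =====
-- def mais(lista):
--   # Divide and conquer: the parity balance of a list (odds minus evens) is the
--   # sum of the balances of its two halves; odds exceed evens iff balance > 0.
--   def balance(xs):
--     if len(xs) == 0:
--       return 0
--     if len(xs) == 1:
--       return 1 if xs[0] % 2 else -1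
--     m = len(xs) // 2
--     return balance(xs[:m]) + balance(xs[m:])
--   return balance(lista) > 0
-- ===== Notes on version B (the rewrite author's own statement) =====
-- stated objective: alternative
-- what changed: Replaces A's single linear pass with two counters by a divide-and-conquer recursion computing the parity balance (odds minus evens, +1 per odd, -1 per even) of each half and summing, returning balance > 0.
import Mathlib
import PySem

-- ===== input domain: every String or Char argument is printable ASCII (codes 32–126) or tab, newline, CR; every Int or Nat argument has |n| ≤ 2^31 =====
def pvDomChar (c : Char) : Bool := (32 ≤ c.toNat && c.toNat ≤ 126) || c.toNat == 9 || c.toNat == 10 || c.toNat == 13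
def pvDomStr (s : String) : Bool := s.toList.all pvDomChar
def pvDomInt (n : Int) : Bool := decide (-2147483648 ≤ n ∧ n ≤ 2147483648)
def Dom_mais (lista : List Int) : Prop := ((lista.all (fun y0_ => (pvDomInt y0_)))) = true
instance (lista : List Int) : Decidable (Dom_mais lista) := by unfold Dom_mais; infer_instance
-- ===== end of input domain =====

-- ===== PORT A =====
-- B computes the parity balance (odds minus evens) by divide and conquer instead of A's linear two-counter pass; objective: alternative.
def mais (lista : List Int) : Bool :=
  let st := lista.foldl (fun (pq : Int × Int) elemento =>
    if PySem.Int.mod elemento 2 == 0 then (pq.1 + 1, pq.2) else (pq.1, pq.2 + 1)) (0, 0)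
  if st.2 > st.1 then true else false

-- ===== PORT B =====
-- helper `balance xs`: 0 on [], +1/-1 on a singleton (odd/even), else sum of the
-- balances of the two halves xs[:m], xs[m:] with m = len(xs)//2 (here take/drop,
-- exact for 0 ≤ m ≤ len).
def maisBalance : List Int → Int
  | [] => 0
  | [a] => if PySem.Int.mod a 2 == 0 then -1 else 1
  | a :: b :: rest =>
      maisBalance ((a :: b :: rest).take ((a :: b :: rest).length / 2)) +
      maisBalance ((a :: b :: rest).drop ((a :: b :: rest).length / 2))
termination_by xs => xs.length
decreasing_by
  · simp only [List.length_take, List.length_cons]; omega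
  · simp only [List.length_drop, List.length_cons]; omega

def mais_alt (lista : List Int) : Bool := decide (maisBalance lista > 0)

-- ===== PRECONDITION & SPEC =====
def Spec_mais (lista : List Int) (out : Bool) : Prop := out = mais_alt lista
instance (lista : List Int) (out : Bool) : Decidable (Spec_mais lista out) := by unfold Spec_mais; infer_instance

-- ===== CLAIM (what is proved, stated in full; the proofs are below) =====
def Claim_equal_mais : Prop := ∀ (lista : List Int), Dom_mais lista → Spec_mais lista (mais lista)

-- ===== LEMMAS AND PROOFS =====

def maisSign (e : Int) : Int := if PySem.Int.mod e 2 == 0 then -1 else 1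

lemma maisBalance_eq (xs : List Int) : maisBalance xs = (xs.map maisSign).sum := by
  fun_induction maisBalance xs with
  | case1 => simp
  | case2 a h =>
    simp only [List.map_cons, List.map_nil, List.sum_cons, List.sum_nil, add_zero, maisSign,
      if_pos h]
  | case3 a h =>
    simp only [List.map_cons, List.map_nil, List.sum_cons, List.sum_nil, add_zero, maisSign,
      if_neg h]
  | case4 a b rest ih1 ih2 =>
    rw [ih1, ih2, ← List.sum_append, ← List.map_append, List.take_append_drop]

lemma mais_loop (l : List Int) (p q : Int) :
    l.foldl (fun (pq : Int × Int) elemento =>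
      if PySem.Int.mod elemento 2 == 0 then (pq.1 + 1, pq.2) else (pq.1, pq.2 + 1)) (p, q)
    = (p + (l.length : Int) - (l.map (fun e => PySem.Int.mod e 2)).sum,
       q + (l.map (fun e => PySem.Int.mod e 2)).sum) := by
  induction l generalizing p q with
  | nil => simp
  | cons a t ih =>
    have hm : PySem.Int.mod a 2 = 0 ∨ PySem.Int.mod a 2 = 1 := by
      rw [PySem.Int.mod_eq_emod_of_pos (by norm_num)]; omega
    rw [List.foldl_cons, List.map_cons, List.sum_cons]
    rcases hm with h | h
    · rw [if_pos (beq_iff_eq.mpr h), ih, h, Prod.ext_iff]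
      constructor <;> (simp only [List.length_cons]; push_cast; ring)
    · rw [if_neg (by rw [h]; decide), ih, h, Prod.ext_iff]
      constructor <;> (simp only [List.length_cons]; push_cast; ring)

lemma maisSign_sum (l : List Int) :
    (l.map maisSign).sum = 2 * (l.map (fun e => PySem.Int.mod e 2)).sum - (l.length : Int) := by
  induction l with
  | nil => simp
  | cons a t ih =>
    have hm : PySem.Int.mod a 2 = 0 ∨ PySem.Int.mod a 2 = 1 := by
      rw [PySem.Int.mod_eq_emod_of_pos (by norm_num)]; omega
    simp only [List.map_cons, List.sum_cons, List.length_cons, ih, maisSign]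
    rcases hm with h | h <;> rw [h] <;> push_cast <;> simp <;> ring

-- ===== VERDICT (by name: the statement is the Claim_ definition above) =====
theorem mais_spec : Claim_equal_mais := by
  intro lista _
  unfold Spec_mais mais mais_alt
  rw [mais_loop, maisBalance_eq, maisSign_sum]
  simp only []
  split_ifs with h
  · exact (decide_eq_true (by omega)).symm
  · exact (decide_eq_false (by omega)).symm
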